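-- pv_equiv track=rewrite | github.com/solsword/procedural | app/static/python_modules/maze.py | mazeWithUpdate
-- ===== SOURCE A (Python) =====
-- def mazeWithUpdate(maze, x, y, newTile):
--   """
--   Accepts a maze and returns a new maze where the tile at the given x/y
--   coordinates has been replaced with the given new tile. Makes no change
--   if the location is outside the maze.
--   """
--   rows = maze.split('\n')
--   result = ''
--   for rowY, row in enumerate(rows):
--     for tileX, tile in enumerate(row):
--       if rowY == y and tileX == x:
--         result = result + newTile
--       else:
--         result = result + tile
--     # After every full cycle of the inner loop (except the last), we add
--     # a newline to our result
--     if rowY < len(rows) - 1: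
--       result = result + '\n'
--
--   return result
-- ===== SOURCE B (Python) =====
-- def mazeWithUpdate(maze, x, y, newTile):
--   """
--   Row-level rewrite: split into rows, splice newTile into the one affected
--   row when (x, y) is in range, and join the rows back together.
--   """
--   rows = maze.split('\n')
--   if 0 <= y < len(rows):
--     row = rows[y]
--     if 0 <= x < len(row):
--       rows[y] = row[:x] + newTile + row[x + 1:]
--   return '\n'.join(rows)
-- ===== Notes on version B (the rewrite author's own statement) =====
-- stated objective: faster
-- what changed: Replaces A's nested per-character scan with quadratic string concatenation by a single row-level slice splice: split into rows, bounds-check (x, y), rewrite only rows[y] via slicing, and '\n'.join the rows.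
import Mathlib
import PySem

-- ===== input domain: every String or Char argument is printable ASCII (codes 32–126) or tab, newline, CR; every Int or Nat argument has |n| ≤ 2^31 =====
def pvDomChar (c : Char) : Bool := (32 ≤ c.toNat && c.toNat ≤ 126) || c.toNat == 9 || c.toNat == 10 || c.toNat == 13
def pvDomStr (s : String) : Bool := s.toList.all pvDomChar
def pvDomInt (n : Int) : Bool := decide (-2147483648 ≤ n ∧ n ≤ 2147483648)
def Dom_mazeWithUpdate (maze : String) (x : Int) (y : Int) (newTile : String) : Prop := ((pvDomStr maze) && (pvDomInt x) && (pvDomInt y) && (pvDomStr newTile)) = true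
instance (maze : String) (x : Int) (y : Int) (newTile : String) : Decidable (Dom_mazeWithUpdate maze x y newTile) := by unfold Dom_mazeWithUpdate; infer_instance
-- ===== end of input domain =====

-- B replaces A's nested per-character rebuild (quadratic concatenation) with one bounds-checked row-level slice splice; measured faster.

-- ===== PORT A =====
def mazeWithUpdate (maze : String) (x : Int) (y : Int) (newTile : String) : String :=
  let rows := PySem.Chars.splitOn maze.toList ['\n']
  let result := (PySem.List.enumerate rows).foldl (fun result p =>
      let result := (PySem.List.enumerate p.2).foldl (fun result q =>
          if p.1 == y && q.1 == x then result ++ newTile.toList else result ++ [q.2]) result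
      if p.1 < (rows.length : Int) - 1 then result ++ ['\n'] else result)
    ([] : List Char)
  String.ofList result

-- ===== PORT B =====
def mazeWithUpdate_alt (maze : String) (x : Int) (y : Int) (newTile : String) : String :=
  let rows := PySem.Chars.splitOn maze.toList ['\n']
  let rows' :=
    if 0 ≤ y ∧ y < (rows.length : Int) then
      let row := rows.getD y.toNat []
      if 0 ≤ x ∧ x < (row.length : Int) then
        rows.set y.toNat
          (PySem.List.slice row none (some x) ++ newTile.toList ++ PySem.List.slice row (some (x + 1)) none)
      else rows
    else rows
  String.ofList (PySem.Chars.join ['\n'] rows')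

-- ===== PRECONDITION & SPEC =====
def Spec_mazeWithUpdate (maze : String) (x : Int) (y : Int) (newTile : String) (out : String) : Prop := out = mazeWithUpdate_alt maze x y newTile
instance (maze : String) (x : Int) (y : Int) (newTile : String) (out : String) : Decidable (Spec_mazeWithUpdate maze x y newTile out) := by unfold Spec_mazeWithUpdate; infer_instance

-- ===== CLAIM (what is proved, stated in full; the proofs are below) =====
def Claim_equal_mazeWithUpdate : Prop := ∀ (maze : String) (x : Int) (y : Int) (newTile : String), Dom_mazeWithUpdate maze x y newTile → Spec_mazeWithUpdate maze x y newTile (mazeWithUpdate maze x y newTile)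

-- ===== LEMMAS AND PROOFS =====

/-- Specification of A's inner loop over one row: each character at running
index `j` is replaced by `nt` exactly when the row index matched (`k = y`)
and the column matches `x`. -/
def innerSpec (y x : Int) (nt : List Char) (k j : Int) : List Char → List Char
  | [] => []
  | c :: cs => (if k == y && j == x then nt else [c]) ++ innerSpec y x nt k (j + 1) cs

/-- Specification of A's outer loop: rows from running index `k`, with a
newline after every row whose index is `< n - 1`. -/
def joinSpec (y x : Int) (nt : List Char) (k n : Int) : List (List Char) → List Char
  | [] => []
  | r :: rs => innerSpec y x nt k 0 r ++ (if k < n - 1 then ['\n'] else []) ++ joinSpec y x nt (k + 1) n rs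

/-- The rows of the result, indexed from `k`. -/
def mapSpec (y x : Int) (nt : List Char) (k : Int) : List (List Char) → List (List Char)
  | [] => []
  | r :: rs => innerSpec y x nt k 0 r :: mapSpec y x nt (k + 1) rs

theorem innerFold_eq (y x : Int) (nt : List Char) (k : Int) :
    ∀ (cs : List Char) (j : Int) (acc : List Char),
      (PySem.List.enumerate cs j).foldl
        (fun result q => if k == y && q.1 == x then result ++ nt else result ++ [q.2]) acc
      = acc ++ innerSpec y x nt k j cs := by
  intro cs
  induction cs with
  | nil => intro j acc; simp [PySem.List.enumerate, innerSpec]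
  | cons c cs ih =>
    intro j acc
    rw [show PySem.List.enumerate (c :: cs) j = (j, c) :: PySem.List.enumerate cs (j + 1) from rfl,
      List.foldl_cons]
    by_cases h : (k == y && j == x) = true
    · rw [if_pos h, ih (j + 1) (acc ++ nt)]
      simp [innerSpec, h]
    · rw [if_neg h, ih (j + 1) (acc ++ [c])]
      simp [innerSpec, h]

theorem outerFold_eq (y x : Int) (nt : List Char) (n : Int) :
    ∀ (rs : List (List Char)) (k : Int) (acc : List Char),
      (PySem.List.enumerate rs k).foldl (fun result p =>
          let result := (PySem.List.enumerate p.2).foldl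
            (fun result q => if p.1 == y && q.1 == x then result ++ nt else result ++ [q.2]) result
          if p.1 < n - 1 then result ++ ['\n'] else result) acc
      = acc ++ joinSpec y x nt k n rs := by
  intro rs
  induction rs with
  | nil => intro k acc; simp [PySem.List.enumerate, joinSpec]
  | cons r rs ih =>
    intro k acc
    rw [show PySem.List.enumerate (r :: rs) k = (k, r) :: PySem.List.enumerate rs (k + 1) from rfl,
      List.foldl_cons]
    simp only [innerFold_eq y x nt k r 0 acc]
    by_cases h : k < n - 1
    · rw [if_pos h, ih (k + 1) (acc ++ innerSpec y x nt k 0 r ++ ['\n'])]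
      simp [joinSpec, h]
    · rw [if_neg h, ih (k + 1) (acc ++ innerSpec y x nt k 0 r)]
      simp [joinSpec, h]

theorem innerSpec_id (y x : Int) (nt : List Char) (k : Int) (hk : k ≠ y) :
    ∀ (cs : List Char) (j : Int), innerSpec y x nt k j cs = cs := by
  intro cs
  induction cs with
  | nil => intro j; rfl
  | cons c cs ih =>
    intro j
    have : (k == y) = false := by simp [hk]
    simp [innerSpec, this, ih]

theorem innerSpec_match (y x : Int) (nt : List Char) :
    ∀ (cs : List Char) (j : Int),
      innerSpec y x nt y j cs =
        if j ≤ x ∧ x < j + cs.length then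
          cs.take (x - j).toNat ++ nt ++ cs.drop ((x - j).toNat + 1)
        else cs := by
  intro cs
  induction cs with
  | nil => intro j; simp [innerSpec]
  | cons c cs ih =>
    intro j
    simp only [innerSpec, beq_self_eq_true, Bool.true_and]
    rw [ih (j + 1)]
    split_ifs with h1 h2 h2 <;> simp_all <;> try omega
    rw [show (x - j).toNat = (x - (j + 1)).toNat + 1 by omega, List.take_succ_cons]
    simp

theorem joinSpec_eq_join (y x : Int) (nt : List Char) (n : Int) :
    ∀ (rs : List (List Char)) (k : Int), n = k + rs.length →
      joinSpec y x nt k n rs = PySem.Chars.join ['\n'] (mapSpec y x nt k rs) := by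
  intro rs
  induction rs with
  | nil => intro k _; simp [joinSpec, mapSpec, PySem.Chars.join_nil]
  | cons r rs ih =>
    intro k hn
    cases rs with
    | nil =>
      have h : ¬ k < n - 1 := by simp at hn; omega
      simp [joinSpec, mapSpec, h, PySem.Chars.join_singleton]
    | cons r2 rs2 =>
      have hlt : k < n - 1 := by simp at hn; omega
      rw [show mapSpec y x nt k (r :: r2 :: rs2)
            = innerSpec y x nt k 0 r :: mapSpec y x nt (k + 1) (r2 :: rs2) from rfl,
        show mapSpec y x nt (k + 1) (r2 :: rs2)
            = innerSpec y x nt (k + 1) 0 r2 :: mapSpec y x nt (k + 1 + 1) rs2 from rfl,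
        PySem.Chars.join_cons_cons]
      rw [show joinSpec y x nt k n (r :: r2 :: rs2)
            = innerSpec y x nt k 0 r ++ (if k < n - 1 then ['\n'] else [])
              ++ joinSpec y x nt (k + 1) n (r2 :: rs2) from rfl]
      rw [ih (k + 1) (by simp at hn ⊢; omega), if_pos hlt]
      rw [show mapSpec y x nt (k + 1) (r2 :: rs2)
            = innerSpec y x nt (k + 1) 0 r2 :: mapSpec y x nt (k + 1 + 1) rs2 from rfl]

theorem mapSpec_eq_set (y x : Int) (nt : List Char) :
    ∀ (rs : List (List Char)) (k : Int),
      mapSpec y x nt k rs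
      = if k ≤ y ∧ y < k + rs.length then
          rs.set (y - k).toNat (innerSpec y x nt y 0 (rs.getD (y - k).toNat []))
        else rs := by
  intro rs
  induction rs with
  | nil => intro k; simp [mapSpec]
  | cons r rs ih =>
    intro k
    rw [show mapSpec y x nt k (r :: rs) = innerSpec y x nt k 0 r :: mapSpec y x nt (k + 1) rs from rfl,
      ih (k + 1)]
    by_cases hky : k = y
    · subst hky
      rw [if_neg (show ¬ (k + 1 ≤ k ∧ k < k + 1 + (rs.length : Int)) by omega),
        if_pos (show k ≤ k ∧ k < k + ((r :: rs).length : Int) by simp)]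
      simp
    · rw [innerSpec_id y x nt k hky]
      split_ifs with h1 h2 h2 <;> simp_all <;> try omega
      rw [show (y - k).toNat = (y - (k + 1)).toNat + 1 by omega]
      rfl

theorem set_getD_self (rs : List (List Char)) (m : Nat) (hm : m < rs.length) :
    rs.set m (rs.getD m []) = rs := by
  apply List.ext_getElem
  · simp
  · intro i h1 h2
    rw [List.getElem_set]
    by_cases hi : m = i
    · subst hi; simp [List.getD, List.getElem?_eq_getElem hm]
    · simp [hi]

-- ===== VERDICT (by name: the statement is the Claim_ definition above) =====
theorem mazeWithUpdate_spec : Claim_equal_mazeWithUpdate := by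
  intro maze x y newTile _
  unfold Spec_mazeWithUpdate mazeWithUpdate mazeWithUpdate_alt
  simp only []
  set rows := PySem.Chars.splitOn maze.toList ['\n'] with hrows
  rw [outerFold_eq, List.nil_append,
    joinSpec_eq_join y x newTile.toList (rows.length : Int) rows 0 (by simp),
    mapSpec_eq_set]
  congr 1
  by_cases hy : 0 ≤ y ∧ y < (rows.length : Int)
  · rw [if_pos (by constructor <;> [omega; (simp; omega)]), if_pos hy]
    have hyt : (y - 0).toNat = y.toNat := by omega
    rw [hyt, innerSpec_match]
    set row := rows.getD y.toNat [] with hrow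
    have hrowlen : (row.length : Int) = ((rows.getD y.toNat []).length : Int) := by rw [hrow]
    by_cases hx : 0 ≤ x ∧ x < (row.length : Int)
    · rw [if_pos (by constructor <;> omega), if_pos hx]
      rw [PySem.List.slice_to row hx.1, PySem.List.slice_from row (by omega : (0:Int) ≤ x + 1)]
      have h1 : (x - 0).toNat = x.toNat := by omega
      have h2 : (x + 1).toNat = x.toNat + 1 := by omega
      rw [h1, h2]
    · rw [if_neg (by omega), if_neg hx, hrow]
      exact congrArg _ (set_getD_self rows y.toNat (by omega))
  · rw [if_neg (by omega), if_neg hy]
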